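-- pv_equiv track=rewrite | github.com/marcelcata/aoc_2023 | day13/day13_part2.py | _is_a_proper_reflection
-- ===== SOURCE A (Python) =====
-- def _is_a_proper_reflection(pattern, i, smudge_index):
--     """Check that the reflection follows along the whole pattern."""
--     checked_rows = [i, i+1]
--     for j in range(1, i + 1):
--         if (i-j) >= 0 and (i + j + 1) < len(pattern):
--             checked_rows.append(i-j)
--             checked_rows.append(i+j+1)
--             if pattern[i-j] != pattern[i + j + 1]:
--                 return False
--
--     # Reflection is only good if the smudge is part of it
--     if smudge_index in checked_rows:
--         return True
--     else:
--         return False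
-- ===== SOURCE B (Python) =====
-- def _is_a_proper_reflection(pattern, i, smudge_index):
--     """Check that the reflection follows along the whole pattern."""
--     # closed-form number of mirrored pairs beyond the central (i, i+1) pair
--     p = max(0, min(i, len(pattern) - i - 2))
--     # the reversed rows above the line must equal the rows below it
--     if pattern[i - p:i][::-1] != pattern[i + 2:i + p + 2]:
--         return False
--     # the smudge must lie inside the reflected span
--     return (i - p) <= smudge_index <= (i + p + 1)
-- ===== Notes on version B (the rewrite author's own statement) =====
-- stated objective: simpler
-- what changed: Replaces A's outward accumulation loop with checked_rows list and membership test by a closed-form mirrored-pair count p = max(0, min(i, len-i-2)), one reversed-slice comparison, and an arithmetic range test for the smudge index.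
import Mathlib
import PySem

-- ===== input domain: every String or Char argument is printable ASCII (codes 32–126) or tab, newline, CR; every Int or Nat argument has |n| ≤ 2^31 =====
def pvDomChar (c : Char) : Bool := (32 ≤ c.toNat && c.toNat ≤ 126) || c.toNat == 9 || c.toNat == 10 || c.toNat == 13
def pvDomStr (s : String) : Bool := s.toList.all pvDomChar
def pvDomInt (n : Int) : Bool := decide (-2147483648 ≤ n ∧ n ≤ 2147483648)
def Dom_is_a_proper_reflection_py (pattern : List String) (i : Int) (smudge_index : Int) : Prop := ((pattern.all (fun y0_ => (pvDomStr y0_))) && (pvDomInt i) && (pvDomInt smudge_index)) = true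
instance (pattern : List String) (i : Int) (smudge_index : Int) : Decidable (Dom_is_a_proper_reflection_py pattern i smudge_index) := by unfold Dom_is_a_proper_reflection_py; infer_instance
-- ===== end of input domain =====

-- B replaces A's outward accumulation loop by a closed-form pair count, one slice
-- comparison and an arithmetic range test for the smudge (objective: simpler).

-- ===== PORT A =====
-- A's for-loop over j in range(1, i+1); `none` models the early `return False`.
def pvALoop (pattern : List String) (i : Int) : List Int → List Int → Option (List Int)
  | [], acc => some acc
  | j :: js, acc =>
    if 0 ≤ i - j ∧ i + j + 1 < (pattern.length : Int) then
      let acc2 := acc ++ [i - j, i + j + 1]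
      if PySem.List.pyGet? pattern (i - j) ≠ PySem.List.pyGet? pattern (i + j + 1) then
        none
      else pvALoop pattern i js acc2
    else pvALoop pattern i js acc

def is_a_proper_reflection_py (pattern : List String) (i : Int) (smudge_index : Int) : Bool :=
  match pvALoop pattern i (PySem.List.pyRange 1 (i + 1) 1) [i, i + 1] with
  | none => false
  | some checked_rows => decide (smudge_index ∈ checked_rows)

-- ===== PORT B =====
def is_a_proper_reflection_py_alt (pattern : List String) (i : Int) (smudge_index : Int) : Bool :=
  let p := max 0 (min i ((pattern.length : Int) - i - 2))
  if (PySem.List.slice pattern (some (i - p)) (some i)).reverse ≠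
      PySem.List.slice pattern (some (i + 2)) (some (i + p + 2)) then
    false
  else
    decide (i - p ≤ smudge_index ∧ smudge_index ≤ i + p + 1)

-- ===== PRECONDITION & SPEC =====
def Spec_is_a_proper_reflection_py (pattern : List String) (i : Int) (smudge_index : Int) (out : Bool) : Prop := out = is_a_proper_reflection_py_alt pattern i smudge_index
instance (pattern : List String) (i : Int) (smudge_index : Int) (out : Bool) : Decidable (Spec_is_a_proper_reflection_py pattern i smudge_index out) := by unfold Spec_is_a_proper_reflection_py; infer_instance

-- ===== CLAIM (what is proved, stated in full; the proofs are below) =====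
def Claim_equal_is_a_proper_reflection_py : Prop := ∀ (pattern : List String) (i : Int) (smudge_index : Int), Dom_is_a_proper_reflection_py pattern i smudge_index → Spec_is_a_proper_reflection_py pattern i smudge_index (is_a_proper_reflection_py pattern i smudge_index)

-- ===== LEMMAS AND PROOFS =====

-- the closed-form number of mirrored pairs beyond the central (i, i+1) pair
def pvP (pattern : List String) (i : Int) : Int :=
  max 0 (min i ((pattern.length : Int) - i - 2))

-- "all mirrored pairs from j = a up to pvP match"
def pvOk (pattern : List String) (i a : Int) : Bool :=
  (PySem.List.pyRange a (pvP pattern i + 1) 1).all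
    (fun j => decide (PySem.List.pyGet? pattern (i - j) = PySem.List.pyGet? pattern (i + j + 1)))

def pvRes (o : Option (List Int)) (s : Int) : Bool :=
  match o with
  | none => false
  | some l => decide (s ∈ l)

lemma pvP_nonneg (pattern : List String) (i : Int) : 0 ≤ pvP pattern i := by
  unfold pvP; omega

lemma pvALoop_skip (pattern : List String) (i : Int) :
    ∀ (n : ℕ) (a : Int) (acc : List Int), (i + 1 - a).toNat = n → pvP pattern i < a →
    pvALoop pattern i (PySem.List.pyRange a (i + 1) 1) acc = some acc := by
  intro n
  induction n with
  | zero =>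
    intro a acc hn _
    rw [PySem.List.pyRange_one_eq_nil (by omega)]
    rfl
  | succ n ih =>
    intro a acc hn ha
    by_cases hab : i + 1 ≤ a
    · rw [PySem.List.pyRange_one_eq_nil hab]; rfl
    · rw [PySem.List.pyRange_one_cons (by omega)]
      have hpv := pvP_nonneg pattern i
      have hcond : ¬ (0 ≤ i - a ∧ i + a + 1 < (pattern.length : Int)) := by
        unfold pvP at ha hpv
        omega
      simp only [pvALoop, if_neg hcond]
      exact ih (a + 1) acc (by omega) (by omega)

lemma pvALoop_spec (pattern : List String) (i s : Int) :
    ∀ (n : ℕ) (a : Int) (acc : List Int), (pvP pattern i + 1 - a).toNat = n →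
    1 ≤ a → a ≤ pvP pattern i + 1 →
    (∀ x, x ∈ acc ↔ i - (a - 1) ≤ x ∧ x ≤ i + a) →
    pvRes (pvALoop pattern i (PySem.List.pyRange a (i + 1) 1) acc) s =
      (pvOk pattern i a &&
        decide (i - pvP pattern i ≤ s ∧ s ≤ i + pvP pattern i + 1)) := by
  intro n
  induction n with
  | zero =>
    intro a acc hn h1 h2 hacc
    have hae : a = pvP pattern i + 1 := by omega
    rw [pvALoop_skip pattern i (i + 1 - a).toNat a acc rfl (by omega)]
    unfold pvOk
    rw [PySem.List.pyRange_one_eq_nil (by omega)]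
    simp only [List.all_nil, Bool.true_and, pvRes]
    have : (s ∈ acc) ↔ (i - pvP pattern i ≤ s ∧ s ≤ i + pvP pattern i + 1) := by
      rw [hacc s]; omega
    exact decide_eq_decide.mpr this
  | succ n ih =>
    intro a acc hn h1 h2 hacc
    have hple : a ≤ pvP pattern i := by omega
    have hfacts : a ≤ i ∧ a ≤ (pattern.length : Int) - i - 2 := by
      have := pvP_nonneg pattern i
      unfold pvP at hple this
      omega
    rw [PySem.List.pyRange_one_cons (by omega)]
    have hcond : (0 ≤ i - a ∧ i + a + 1 < (pattern.length : Int)) := by omega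
    unfold pvOk
    rw [PySem.List.pyRange_one_cons (by omega : a < pvP pattern i + 1)]
    by_cases hm : PySem.List.pyGet? pattern (i - a) = PySem.List.pyGet? pattern (i + a + 1)
    · simp only [pvALoop, if_pos hcond, hm, List.all_cons, decide_true, Bool.true_and]
      rw [if_neg (fun h => h rfl)]
      have := ih (a + 1) (acc ++ [i - a, i + a + 1]) (by omega) (by omega) (by omega)
        (by
          intro x
          simp only [List.mem_append, List.mem_cons,
            List.not_mem_nil, or_false, hacc x]
          omega)
      unfold pvOk at this
      exact this
    · simp only [pvALoop, if_pos hcond, if_pos hm, List.all_cons,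
        decide_eq_false hm, Bool.false_and, pvRes]

lemma pvA_canon (pattern : List String) (i s : Int) :
    is_a_proper_reflection_py pattern i s =
      (pvOk pattern i 1 &&
        decide (i - pvP pattern i ≤ s ∧ s ≤ i + pvP pattern i + 1)) := by
  have h : is_a_proper_reflection_py pattern i s =
      pvRes (pvALoop pattern i (PySem.List.pyRange 1 (i + 1) 1) [i, i + 1]) s := by
    unfold is_a_proper_reflection_py pvRes
    rfl
  rw [h]
  exact pvALoop_spec pattern i s (pvP pattern i).toNat 1 [i, i + 1]
    (by have := pvP_nonneg pattern i; omega) (by omega)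
    (by have := pvP_nonneg pattern i; omega)
    (by intro x; simp only [List.mem_cons, List.not_mem_nil, or_false]; omega)

lemma pvSlices_iff (pattern : List String) (i : Int) :
    ((PySem.List.slice pattern (some (i - pvP pattern i)) (some i)).reverse =
      PySem.List.slice pattern (some (i + 2)) (some (i + pvP pattern i + 2)))
    ↔ pvOk pattern i 1 = true := by
  by_cases hp : pvP pattern i = 0
  · have h1 : PySem.List.slice pattern (some (i - pvP pattern i)) (some i) = [] := by
      apply List.length_eq_zero_iff.mp
      rw [hp, sub_zero, PySem.List.length_slice]
      omega
    have h2 : PySem.List.slice pattern (some (i + 2)) (some (i + pvP pattern i + 2)) = [] := by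
      apply List.length_eq_zero_iff.mp
      rw [hp, add_zero, PySem.List.length_slice]
      omega
    have h3 : pvOk pattern i 1 = true := by
      unfold pvOk
      rw [hp, PySem.List.pyRange_one_eq_nil (by omega)]
      rfl
    simp [h1, h2, h3]
  · have hp0 := pvP_nonneg pattern i
    obtain ⟨hpi, hpL⟩ : pvP pattern i ≤ i ∧ i + pvP pattern i + 2 ≤ (pattern.length : Int) := by
      have hdef : pvP pattern i = max 0 (min i ((pattern.length : Int) - i - 2)) := rfl
      omega
    have hs1 : PySem.List.slice pattern (some (i - pvP pattern i)) (some i) =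
        (pattern.drop (i - pvP pattern i).toNat).take
          (i.toNat - (i - pvP pattern i).toNat) :=
      PySem.List.slice_toNat pattern (by omega) (by omega)
    have hs2 : PySem.List.slice pattern (some (i + 2)) (some (i + pvP pattern i + 2)) =
        (pattern.drop (i + 2).toNat).take
          ((i + pvP pattern i + 2).toNat - (i + 2).toNat) :=
      PySem.List.slice_toNat pattern (by omega) (by omega)
    have hlen1 : ((pattern.drop (i - pvP pattern i).toNat).take
        (i.toNat - (i - pvP pattern i).toNat)).length = (pvP pattern i).toNat := by
      rw [List.length_take, List.length_drop]
      omega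
    have hlen2 : ((pattern.drop (i + 2).toNat).take
        ((i + pvP pattern i + 2).toNat - (i + 2).toNat)).length = (pvP pattern i).toNat := by
      rw [List.length_take, List.length_drop]
      omega
    have hg1 : ∀ k : ℕ, k < (pvP pattern i).toNat →
        ((pattern.drop (i - pvP pattern i).toNat).take
          (i.toNat - (i - pvP pattern i).toNat)).reverse[k]? = pattern[i.toNat - 1 - k]? := by
      intro k hk
      rw [List.getElem?_reverse (hlen1 ▸ hk), hlen1]
      rw [List.getElem?_take_of_lt (by omega), List.getElem?_drop]
      congr 1
      omega
    have hg2 : ∀ k : ℕ, k < (pvP pattern i).toNat →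
        ((pattern.drop (i + 2).toNat).take
          ((i + pvP pattern i + 2).toNat - (i + 2).toNat))[k]? = pattern[(i + 2).toNat + k]? := by
      intro k hk
      rw [List.getElem?_take_of_lt (by omega), List.getElem?_drop]
    rw [hs1, hs2]
    have hMidS : ((pattern.drop (i - pvP pattern i).toNat).take
          (i.toNat - (i - pvP pattern i).toNat)).reverse =
        (pattern.drop (i + 2).toNat).take
          ((i + pvP pattern i + 2).toNat - (i + 2).toNat) ↔
        (∀ k : ℕ, k < (pvP pattern i).toNat →
          pattern[i.toNat - 1 - k]? = pattern[(i + 2).toNat + k]?) := by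
      constructor
      · intro h k hk
        rw [← hg1 k hk, ← hg2 k hk, h]
      · intro h
        apply List.ext_getElem?
        intro k
        by_cases hk : k < (pvP pattern i).toNat
        · rw [hg1 k hk, hg2 k hk]
          exact h k hk
        · rw [List.getElem?_eq_none (by rw [List.length_reverse, hlen1]; omega),
            List.getElem?_eq_none (by rw [hlen2]; omega)]
    rw [hMidS]
    unfold pvOk
    rw [List.all_eq_true]
    constructor
    · intro h j hj
      rw [PySem.List.mem_pyRange_one] at hj
      rw [decide_eq_true_iff,
        PySem.List.pyGet?_of_nonneg pattern (show (0:Int) ≤ i - j by omega),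
        PySem.List.pyGet?_of_nonneg pattern (show (0:Int) ≤ i + j + 1 by omega)]
      have hk := h (j - 1).toNat (by omega)
      have e1 : (i - j).toNat = i.toNat - 1 - (j - 1).toNat := by omega
      have e2 : (i + j + 1).toNat = (i + 2).toNat + (j - 1).toNat := by omega
      rw [e1, e2]
      exact hk
    · intro h k hk
      have hj := h ((k : Int) + 1) (by rw [PySem.List.mem_pyRange_one]; omega)
      rw [decide_eq_true_iff,
        PySem.List.pyGet?_of_nonneg pattern (show (0:Int) ≤ i - ((k : Int) + 1) by omega),
        PySem.List.pyGet?_of_nonneg pattern (show (0:Int) ≤ i + ((k : Int) + 1) + 1 by omega)] at hj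
      have e1 : (i - ((k : Int) + 1)).toNat = i.toNat - 1 - k := by omega
      have e2 : (i + ((k : Int) + 1) + 1).toNat = (i + 2).toNat + k := by omega
      rw [e1, e2] at hj
      exact hj

lemma pvB_canon (pattern : List String) (i s : Int) :
    is_a_proper_reflection_py_alt pattern i s =
      (pvOk pattern i 1 &&
        decide (i - pvP pattern i ≤ s ∧ s ≤ i + pvP pattern i + 1)) := by
  have h0 : is_a_proper_reflection_py_alt pattern i s =
      (if (PySem.List.slice pattern (some (i - pvP pattern i)) (some i)).reverse ≠
          PySem.List.slice pattern (some (i + 2)) (some (i + pvP pattern i + 2)) then false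
       else decide (i - pvP pattern i ≤ s ∧ s ≤ i + pvP pattern i + 1)) := rfl
  rw [h0]
  by_cases h : (PySem.List.slice pattern (some (i - pvP pattern i)) (some i)).reverse =
      PySem.List.slice pattern (some (i + 2)) (some (i + pvP pattern i + 2))
  · rw [if_neg (fun hne => hne h), (pvSlices_iff pattern i).mp h, Bool.true_and]
  · rw [if_pos h]
    have hq : pvOk pattern i 1 = false := by
      cases hq : pvOk pattern i 1
      · rfl
      · exact absurd ((pvSlices_iff pattern i).mpr hq) h
    rw [hq, Bool.false_and]

-- ===== VERDICT (by name: the statement is the Claim_ definition above) =====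
theorem is_a_proper_reflection_py_spec : Claim_equal_is_a_proper_reflection_py := by
  intro pattern i s _
  unfold Spec_is_a_proper_reflection_py
  rw [pvA_canon, pvB_canon]
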